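-- pv_equiv track=rewrite | github.com/posl/comment_recommendation | script/split_gen/2_time/en/195_C/8.py | count_comma
-- ===== SOURCE A (Python) =====
-- def count_comma(N):
--     N = str(N)
--     N_len = len(N)
--     cnt = 0
--     for i in range(N_len):
--         if i % 3 == 0 and i != 0:
--             cnt += 1
--     return cnt
-- ===== SOURCE B (Python) =====
-- def count_comma(N):
--     return (len(str(N)) - 1) // 3
-- ===== Notes on version B (the rewrite author's own statement) =====
-- stated objective: simpler
-- what changed: Replaces the loop that counts every third index of range(len(str(N))) except the first by a one-line closed-form floor division of one less than the length of str(N) by three.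
import Mathlib
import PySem

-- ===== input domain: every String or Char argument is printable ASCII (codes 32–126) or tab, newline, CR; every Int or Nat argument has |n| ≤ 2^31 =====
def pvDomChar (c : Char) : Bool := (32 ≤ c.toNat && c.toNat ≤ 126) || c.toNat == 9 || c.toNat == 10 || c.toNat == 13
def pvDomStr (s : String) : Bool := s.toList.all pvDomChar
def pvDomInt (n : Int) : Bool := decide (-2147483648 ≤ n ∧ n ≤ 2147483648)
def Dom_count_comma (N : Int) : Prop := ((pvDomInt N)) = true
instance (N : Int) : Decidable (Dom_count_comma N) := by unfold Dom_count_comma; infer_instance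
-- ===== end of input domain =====

-- B replaces A's index-counting loop by the closed form (len(str(N)) - 1) // 3 (simpler, same cost class).

-- ===== PORT A =====
def count_comma (N : Int) : Int :=
  let s := PySem.Int.toStr N
  let nLen := PySem.Str.len s
  (PySem.List.pyRange 0 nLen 1).foldl
    (fun cnt i => if PySem.Int.mod i 3 = 0 ∧ i ≠ 0 then cnt + 1 else cnt) 0

-- ===== PORT B =====
def count_comma_alt (N : Int) : Int :=
  PySem.Int.floordiv (PySem.Str.len (PySem.Int.toStr N) - 1) 3

-- ===== PRECONDITION & SPEC =====
def Spec_count_comma (N : Int) (out : Int) : Prop := out = count_comma_alt N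
instance (N : Int) (out : Int) : Decidable (Spec_count_comma N out) := by unfold Spec_count_comma; infer_instance

-- ===== CLAIM (what is proved, stated in full; the proofs are below) =====
def Claim_equal_count_comma : Prop := ∀ (N : Int), Dom_count_comma N → Spec_count_comma N (count_comma N)

-- ===== LEMMAS AND PROOFS =====

theorem pvToDigitsCore_ne_nil (fuel : Nat) : ∀ (b n : Nat) (acc : List Char),
    acc ≠ [] → Nat.toDigitsCore b fuel n acc ≠ [] := by
  induction fuel with
  | zero => intro b n acc h; simpa [Nat.toDigitsCore] using h
  | succ f ih =>
    intro b n acc h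
    simp only [Nat.toDigitsCore]
    split
    · simp
    · exact ih _ _ _ (by simp)

theorem pvToDigits_ne_nil (n : Nat) : Nat.toDigits 10 n ≠ [] := by
  unfold Nat.toDigits
  simp only [Nat.toDigitsCore]
  split
  · simp
  · exact pvToDigitsCore_ne_nil _ _ _ _ (by simp)

theorem pvToChars_ne_nil (N : Int) : PySem.Int.toChars N ≠ [] := by
  unfold PySem.Int.toChars
  split
  · simp
  · exact pvToDigits_ne_nil _

-- the loop of A counts the multiples of 3 in [1, n], which is ⌊n/3⌋
theorem pvFold_eq (n : Nat) :
    (PySem.List.pyRange 0 ((n : Int) + 1) 1).foldl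
      (fun cnt i => if PySem.Int.mod i 3 = 0 ∧ i ≠ 0 then cnt + 1 else cnt) 0
      = PySem.Int.floordiv (n : Int) 3 := by
  induction n with
  | zero => decide
  | succ m ih =>
    have hsplit := PySem.List.pyRange_one_succ_right (a := 0) (b := (m : Int) + 1) (by positivity)
    have hcast : ((m + 1 : Nat) : Int) + 1 = ((m : Int) + 1) + 1 := by push_cast; ring
    rw [hcast, hsplit, List.foldl_append, ih]
    simp only [List.foldl_cons, List.foldl_nil]
    rw [PySem.Int.mod_eq_emod_of_pos (by norm_num),
        PySem.Int.floordiv_eq_ediv_of_pos (by norm_num),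
        PySem.Int.floordiv_eq_ediv_of_pos (by norm_num)]
    split_ifs with h
    · omega
    · push Not at h
      by_cases h3 : ((m : Int) + 1) % 3 = 0
      · exact absurd (h h3) (by positivity)
      · omega

-- ===== VERDICT (by name: the statement is the Claim_ definition above) =====
theorem count_comma_spec : Claim_equal_count_comma := by
  intro N _
  unfold Spec_count_comma count_comma count_comma_alt
  obtain ⟨m, hm⟩ : ∃ m, (PySem.Int.toStr N).toList.length = m + 1 := by
    have h := pvToChars_ne_nil N
    rw [← PySem.Int.toList_toStr] at h
    cases hL : (PySem.Int.toStr N).toList with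
    | nil => exact absurd hL h
    | cons a l => exact ⟨l.length, by simp⟩
  simp only [PySem.Str.len, hm]
  have : ((m + 1 : Nat) : Int) = (m : Int) + 1 := by push_cast; ring
  rw [this]
  have := pvFold_eq m
  simpa using this
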